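-- pv_equiv track=rewrite | github.com/NeoZ666/Sem5-AI-LabWork | DFS_8Puzzle.py | dfs
-- ===== SOURCE A (Python) =====
-- def is_valid(x, y):
--     return 0 <= x < 3 and 0 <= y < 3
--
-- def swap(board, x1, y1, x2, y2):
--     board[x1][y1], board[x2][y2] = board[x2][y2], board[x1][y1]
--
-- def find_blank(board):
--     for i in range(3):
--         for j in range(3):
--             if board[i][j] == 0:
--                 return i, j
--
-- def is_goal_state(board, goal_state):
--     return board == goal_state
--
-- def dfs(board, depth, max_depth, goal_state, visited):
--     if depth > max_depth:
--         return False
--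
--     if is_goal_state(board, goal_state):
--         return True
--
--     blank_x, blank_y = find_blank(board)
--
--     for dx, dy in [(0, 1), (1, 0), (0, -1), (-1, 0)]:
--         new_x, new_y = blank_x + dx, blank_y + dy
--
--         if is_valid(new_x, new_y):
--             swap(board, blank_x, blank_y, new_x, new_y)
--             board_hash = tuple(tuple(row) for row in board)
--
--             if board_hash not in visited:
--                 visited.add(board_hash)
--                 if dfs(board, depth + 1, max_depth, goal_state, visited):
--                     return True
--                 visited.remove(board_hash)
--
--             swap(board, blank_x, blank_y, new_x, new_y)
--
--     return False
-- ===== SOURCE B (Python) =====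
-- # B: breadth-first layer expansion instead of recursive depth-first backtracking search.
-- # Return value only: A mutates board/visited in place (restoring them except on a True return); B mutates neither.
--
-- def _blank(s):
--     for i in range(3):
--         for j in range(3):
--             if s[i][j] == 0:
--                 return i, j
--     return None
--
--
-- def _neighbors(s):
--     pos = _blank(s)
--     if pos is None:
--         return []
--     x, y = pos
--     out = []
--     for dx, dy in ((0, 1), (1, 0), (0, -1), (-1, 0)):
--         nx, ny = x + dx, y + dy
--         if 0 <= nx < 3 and 0 <= ny < 3:
--             g = [list(r) for r in s]
--             g[x][y], g[nx][ny] = g[nx][ny], g[x][y]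
--             out.append(tuple(tuple(r) for r in g))
--     return out
--
--
-- def dfs(board, depth, max_depth, goal_state, visited):
--     budget = max_depth - depth
--     if budget < 0:
--         return False
--     start = tuple(tuple(r) for r in board)
--     goal = tuple(tuple(r) for r in goal_state)
--     if start == goal:
--         return True
--     frontier = {start}
--     for _ in range(budget):
--         new = set()
--         for s in frontier:
--             for t in _neighbors(s):
--                 if t not in visited and t not in new:
--                     new.add(t)
--         if goal in new:
--             return True
--         if not new:
--             return False
--         frontier = new
--     return False
-- ===== Notes on version B (the rewrite author's own statement) =====
-- stated objective: alternative
-- what changed: A's recursive depth-first backtracking search (enumerating simple paths with an add/remove visited set) is replaced by an iterative breadth-first layer expansion over deduplicated state sets, checking whether the goal appears within the depth budget.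
import Mathlib
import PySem

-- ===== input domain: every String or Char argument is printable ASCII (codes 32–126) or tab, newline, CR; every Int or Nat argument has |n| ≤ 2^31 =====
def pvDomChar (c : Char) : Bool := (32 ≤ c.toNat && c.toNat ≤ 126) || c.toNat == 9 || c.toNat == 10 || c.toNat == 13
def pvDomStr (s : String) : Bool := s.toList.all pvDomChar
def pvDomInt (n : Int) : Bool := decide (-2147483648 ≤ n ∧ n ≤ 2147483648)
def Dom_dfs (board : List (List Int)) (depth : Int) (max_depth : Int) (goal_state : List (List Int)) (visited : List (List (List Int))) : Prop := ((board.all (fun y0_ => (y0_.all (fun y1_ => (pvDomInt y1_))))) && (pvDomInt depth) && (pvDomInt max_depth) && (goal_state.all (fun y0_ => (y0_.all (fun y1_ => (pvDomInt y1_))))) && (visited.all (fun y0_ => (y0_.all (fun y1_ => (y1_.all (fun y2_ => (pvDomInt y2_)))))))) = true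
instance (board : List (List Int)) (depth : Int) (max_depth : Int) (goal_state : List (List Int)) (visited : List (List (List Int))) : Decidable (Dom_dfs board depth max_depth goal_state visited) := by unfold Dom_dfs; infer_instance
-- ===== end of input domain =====

-- B replaces A's recursive depth-first backtracking by breadth-first layer expansion over deduplicated
-- state sets (objective: alternative). Return value only: the Python A mutates board/visited in place
-- (restoring them except on a True return); B mutates neither.

-- ===== PORT A =====
-- shared board helpers (used by both ports; exact where Pre_dfs holds)
def pvIsValid (x y : Int) : Bool := decide (0 ≤ x ∧ x < 3 ∧ 0 ≤ y ∧ y < 3)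

-- find_blank: first (i,j) with board[i][j] == 0; out-of-range reads (Python IndexError, outside Pre_) read as non-blank
def pvFindBlank (b : List (List Int)) : Option (Int × Int) :=
  (PySem.List.pyRange 0 3 1).findSome? (fun i =>
    (PySem.List.pyRange 0 3 1).findSome? (fun j =>
      if PySem.List.pyGetD (PySem.List.pyGetD b i []) j 1 = 0 then some (i, j) else none))

def pvSetCell (b : List (List Int)) (x y : Int) (v : Int) : List (List Int) :=
  PySem.List.pySetD b x (PySem.List.pySetD (PySem.List.pyGetD b x []) y v)

-- swap(board,x1,y1,x2,y2): read both cells, then assign left-to-right (Python tuple assignment)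
def pvSwap (b : List (List Int)) (x1 y1 x2 y2 : Int) : List (List Int) :=
  let v1 := PySem.List.pyGetD (PySem.List.pyGetD b x1 []) y1 0
  let v2 := PySem.List.pyGetD (PySem.List.pyGetD b x2 []) y2 0
  pvSetCell (pvSetCell b x1 y1 v2) x2 y2 v1

def pvDirs : List (Int × Int) := [(0, 1), (1, 0), (0, -1), (-1, 0)]

-- A's recursive DFS; fuel (max_depth - depth + 1).toNat is 0 exactly when depth > max_depth
def dfsFuel : Nat → List (List Int) → List (List Int) → List (List (List Int)) → Bool
  | 0, _, _, _ => false
  | f + 1, board, goal, visited =>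
    if board = goal then true
    else
      match pvFindBlank board with
      | none => false   -- Python raises (unpacking None) here; outside Pre_dfs
      | some (bx, by') =>
        pvDirs.any (fun d =>
          if pvIsValid (bx + d.1) (by' + d.2) then
            let nb := pvSwap board bx by' (bx + d.1) (by' + d.2)
            if nb ∈ visited then false
            else dfsFuel f nb goal (PySem.Set.add visited nb)
          else false)

def dfs (board : List (List Int)) (depth : Int) (max_depth : Int) (goal_state : List (List Int)) (visited : List (List (List Int))) : Bool :=
  dfsFuel (max_depth - depth + 1).toNat board goal_state visited

-- ===== PORT B =====
def pvNeighbors (b : List (List Int)) : List (List (List Int)) :=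
  match pvFindBlank b with
  | none => []
  | some (x, y) =>
    pvDirs.filterMap (fun d =>
      if pvIsValid (x + d.1) (y + d.2) then some (pvSwap b x y (x + d.1) (y + d.2)) else none)

-- one BFS layer: all neighbours of the frontier that are not blocked by visited, deduplicated
def bfsStep (frontier : List (List (List Int))) (visited : List (List (List Int))) : List (List (List Int)) :=
  frontier.foldl (fun new s =>
    (pvNeighbors s).foldl (fun new t =>
      if t ∈ visited then new else PySem.Set.add new t) new) []

def bfsLoop : Nat → List (List (List Int)) → List (List Int) → List (List (List Int)) → Bool
  | 0, _, _, _ => false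
  | k + 1, frontier, goal, visited =>
    let new := bfsStep frontier visited
    if goal ∈ new then true
    else if new = [] then false
    else bfsLoop k new goal visited

def dfs_alt (board : List (List Int)) (depth : Int) (max_depth : Int) (goal_state : List (List Int)) (visited : List (List (List Int))) : Bool :=
  if max_depth - depth < 0 then false
  else if board = goal_state then true
  else bfsLoop (max_depth - depth).toNat [board] goal_state visited

-- ===== PRECONDITION & SPEC =====
-- Pre_dfs excludes the inputs where A's find_blank/swap raise IndexError, or find_blank returns None
-- (TypeError on unpacking): unless the search is trivially decided (depth budget exhausted, or board
-- already equal to goal), the board must have at least 3 rows of at least 3 cells with a 0 among the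
-- top-left 3×3 cells; on ragged boards the search can occasionally return before touching a short row,
-- and those lucky runs are excluded along with the raising ones.
def Pre_dfs (board : List (List Int)) (depth : Int) (max_depth : Int) (goal_state : List (List Int)) (visited : List (List (List Int))) : Prop :=
  depth > max_depth ∨ board = goal_state ∨
    (3 ≤ board.length ∧ (∀ r ∈ board, 3 ≤ r.length) ∧ (∃ r ∈ board.take 3, (0 : Int) ∈ r.take 3))
instance (board : List (List Int)) (depth : Int) (max_depth : Int) (goal_state : List (List Int)) (visited : List (List (List Int))) : Decidable (Pre_dfs board depth max_depth goal_state visited) := by unfold Pre_dfs; infer_instance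

def pvWitness_dfs : List (List Int) × Int × Int × List (List Int) × List (List (List Int)) :=
  ([[0, 1, 2], [3, 4, 5], [6, 7, 8]], 0, 2, [[1, 0, 2], [3, 4, 5], [6, 7, 8]], [])

def Spec_dfs (board : List (List Int)) (depth : Int) (max_depth : Int) (goal_state : List (List Int)) (visited : List (List (List Int))) (out : Bool) : Prop := out = dfs_alt board depth max_depth goal_state visited
instance (board : List (List Int)) (depth : Int) (max_depth : Int) (goal_state : List (List Int)) (visited : List (List (List Int))) (out : Bool) : Decidable (Spec_dfs board depth max_depth goal_state visited out) := by unfold Spec_dfs; infer_instance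

-- ===== CLAIM (what is proved, stated in full; the proofs are below) =====
def Claim_equal_dfs : Prop := ∀ (board : List (List Int)) (depth : Int) (max_depth : Int) (goal_state : List (List Int)) (visited : List (List (List Int))), Dom_dfs board depth max_depth goal_state visited → Pre_dfs board depth max_depth goal_state visited → Spec_dfs board depth max_depth goal_state visited (dfs board depth max_depth goal_state visited)

-- ===== LEMMAS AND PROOFS =====

-- a walk from s to g whose moved-to states are all fresh w.r.t. V
def WalkOK (V : List (List (List Int))) (g : List (List Int)) : List (List Int) → List (List (List Int)) → Prop
  | s, [] => s = g
  | s, t :: rest => t ∈ pvNeighbors s ∧ t ∉ V ∧ WalkOK V g t rest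

theorem dfsFuel_succ_iff (f : Nat) (b g : List (List Int)) (V : List (List (List Int))) :
    dfsFuel (f + 1) b g V = true ↔
      (b = g ∨ ∃ t, t ∈ pvNeighbors b ∧ t ∉ V ∧ dfsFuel f t g (PySem.Set.add V t) = true) := by
  by_cases hbg : b = g
  · simp [dfsFuel, hbg]
  · cases hfb : pvFindBlank b with
    | none => simp [dfsFuel, pvNeighbors, hfb, hbg]
    | some xy =>
      obtain ⟨x, y⟩ := xy
      simp only [dfsFuel, pvNeighbors, hfb, if_neg hbg, List.any_eq_true, List.mem_filterMap]
      constructor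
      · rintro ⟨d, hd, hP⟩
        by_cases hv : pvIsValid (x + d.1) (y + d.2) = true
        · simp only [if_pos hv] at hP
          by_cases hmem : pvSwap b x y (x + d.1) (y + d.2) ∈ V
          · simp [hmem] at hP
          · simp only [if_neg hmem] at hP
            exact Or.inr ⟨_, ⟨d, hd, by simp [hv]⟩, hmem, hP⟩
        · simp [hv] at hP
      · rintro (rfl | ⟨t, ⟨d, hd, hdt⟩, htV, hrec⟩)
        · exact absurd rfl hbg
        refine ⟨d, hd, ?_⟩
        by_cases hv : pvIsValid (x + d.1) (y + d.2) = true
        · simp only [if_pos hv, Option.some.injEq] at hdt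
          subst hdt
          rw [if_pos hv, if_neg htV]
          exact hrec
        · simp [hv] at hdt


theorem walk_mono (V V' : List (List (List Int))) (g : List (List Int))
    (hsub : ∀ x, x ∈ V → x ∈ V') :
    ∀ (l : List (List (List Int))) (s : List (List Int)), WalkOK V' g s l → WalkOK V g s l := by
  intro l
  induction l with
  | nil => intro s h; exact h
  | cons t rest ih =>
    intro s h
    exact ⟨h.1, fun hx => h.2.1 (hsub _ hx), ih t h.2.2⟩

theorem walk_suffix (V : List (List (List Int))) (g : List (List Int)) :
    ∀ (l1 : List (List (List Int))) (s x : List (List Int)) (l2 : List (List (List Int))),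
      WalkOK V g s (l1 ++ x :: l2) → WalkOK V g x l2 := by
  intro l1
  induction l1 with
  | nil => intro s x l2 h; exact h.2.2
  | cons a l1 ih => intro s x l2 h; exact ih a x l2 h.2.2

theorem walk_avoid (V : List (List (List Int))) (g t : List (List Int)) :
    ∀ (l : List (List (List Int))) (s : List (List Int)),
      (∀ x ∈ l, x ≠ t) → WalkOK V g s l → WalkOK (PySem.Set.add V t) g s l := by
  intro l
  induction l with
  | nil => intro s _ h; exact h
  | cons u rest ih =>
    intro s hne h
    refine ⟨h.1, ?_, ih u (fun x hx => hne x (List.mem_cons_of_mem _ hx)) h.2.2⟩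
    intro hmem
    rcases (PySem.Set.mem_add V t u).mp hmem with h1 | h2
    · exact h.2.1 h1
    · exact hne u (List.mem_cons_self) h2

theorem walk_lastOcc (V : List (List (List Int))) (g t : List (List Int)) :
    ∀ (n : Nat) (l : List (List (List Int))), l.length ≤ n → WalkOK V g t l →
      ∃ l', l'.length ≤ l.length ∧ (∀ x ∈ l', x ≠ t) ∧ WalkOK V g t l' := by
  intro n
  induction n with
  | zero =>
    intro l hl hw
    exact ⟨l, le_refl _, by cases l with
      | nil => simp
      | cons a l => simp at hl, hw⟩
  | succ n ih =>
    intro l hl hw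
    by_cases ht : t ∈ l
    · obtain ⟨l1, l2, rfl⟩ := List.append_of_mem ht
      have hw2 : WalkOK V g t l2 := walk_suffix V g l1 t t l2 hw
      have hlen : l2.length ≤ n := by
        have := hl; simp [List.length_append] at this; omega
      obtain ⟨l', h1, h2, h3⟩ := ih l2 hlen hw2
      refine ⟨l', ?_, h2, h3⟩
      simp [List.length_append]; omega
    · exact ⟨l, le_refl _, fun x hx => by rintro rfl; exact ht hx, hw⟩

theorem dfs_to_walk (g : List (List Int)) :
    ∀ (f : Nat) (b : List (List Int)) (V : List (List (List Int))),
      dfsFuel f b g V = true → ∃ l, l.length < f ∧ WalkOK V g b l := by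
  intro f
  induction f with
  | zero => intro b V h; simp [dfsFuel] at h
  | succ f ih =>
    intro b V h
    rcases (dfsFuel_succ_iff f b g V).mp h with rfl | ⟨t, ht, htV, hrec⟩
    · exact ⟨[], Nat.succ_pos f, rfl⟩
    · obtain ⟨l, hl, hw⟩ := ih t (PySem.Set.add V t) hrec
      have hw' := walk_mono V (PySem.Set.add V t) g
        (fun x hx => (PySem.Set.mem_add V t x).mpr (Or.inl hx)) l t hw
      exact ⟨t :: l, by simpa using Nat.succ_lt_succ hl, ht, htV, hw'⟩

theorem walk_to_dfs (g : List (List Int)) :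
    ∀ (n : Nat) (l : List (List (List Int))) (b : List (List Int)) (V : List (List (List Int))) (f : Nat),
      l.length ≤ n → l.length < f → WalkOK V g b l → dfsFuel f b g V = true := by
  intro n
  induction n with
  | zero =>
    intro l b V f hn hf hw
    cases l with
    | cons t rest => simp at hn
    | nil =>
      cases f with
      | zero => simp at hf
      | succ f => exact (dfsFuel_succ_iff f b g V).mpr (Or.inl hw)
  | succ n ih =>
    intro l b V f hn hf hw
    cases l with
    | nil =>
      cases f with
      | zero => simp at hf
      | succ f => exact (dfsFuel_succ_iff f b g V).mpr (Or.inl hw)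
    | cons t rest =>
      obtain ⟨ht, htV, hw'⟩ := hw
      cases f with
      | zero => simp at hf
      | succ f =>
        by_cases hbg : b = g
        · exact (dfsFuel_succ_iff f b g V).mpr (Or.inl hbg)
        · obtain ⟨l', hlen, hne, hw2⟩ := walk_lastOcc V g t rest.length rest (le_refl _) hw'
          have hw3 := walk_avoid V g t l' t hne hw2
          have hrec : dfsFuel f t g (PySem.Set.add V t) = true := by
            refine ih l' t (PySem.Set.add V t) f ?_ ?_ hw3
            · simp at hn; omega
            · simp at hf; omega
          exact (dfsFuel_succ_iff f b g V).mpr (Or.inr ⟨t, ht, htV, hrec⟩)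

theorem mem_bfsStep (frontier V : List (List (List Int))) (x : List (List Int)) :
    x ∈ bfsStep frontier V ↔ x ∉ V ∧ ∃ s ∈ frontier, x ∈ pvNeighbors s := by
  have inner : ∀ (ts acc : List (List (List Int))),
      (x ∈ ts.foldl (fun new t => if t ∈ V then new else PySem.Set.add new t) acc) ↔
        (x ∈ acc ∨ (x ∉ V ∧ x ∈ ts)) := by
    intro ts
    induction ts with
    | nil => intro acc; simp
    | cons t ts ih =>
      intro acc
      simp only [List.foldl_cons]
      by_cases htV : t ∈ V
      · rw [if_pos htV, ih]
        constructor
        · rintro (h | ⟨h1, h2⟩)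
          · exact Or.inl h
          · exact Or.inr ⟨h1, List.mem_cons_of_mem _ h2⟩
        · rintro (h | ⟨h1, h2⟩)
          · exact Or.inl h
          · rcases List.mem_cons.mp h2 with rfl | h2
            · exact absurd htV h1
            · exact Or.inr ⟨h1, h2⟩
      · rw [if_neg htV, ih]
        constructor
        · rintro (h | ⟨h1, h2⟩)
          · rcases (PySem.Set.mem_add acc t x).mp h with h | rfl
            · exact Or.inl h
            · exact Or.inr ⟨htV, List.mem_cons_self⟩
          · exact Or.inr ⟨h1, List.mem_cons_of_mem _ h2⟩
        · rintro (h | ⟨h1, h2⟩)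
          · exact Or.inl ((PySem.Set.mem_add acc t x).mpr (Or.inl h))
          · rcases List.mem_cons.mp h2 with heq | h2
            · exact Or.inl ((PySem.Set.mem_add acc t x).mpr (Or.inr heq))
            · exact Or.inr ⟨h1, h2⟩
  have outer : ∀ (fr acc : List (List (List Int))),
      (x ∈ fr.foldl (fun new s => (pvNeighbors s).foldl
          (fun new t => if t ∈ V then new else PySem.Set.add new t) new) acc) ↔
        (x ∈ acc ∨ (x ∉ V ∧ ∃ s ∈ fr, x ∈ pvNeighbors s)) := by
    intro fr
    induction fr with
    | nil => intro acc; simp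
    | cons s fr ih =>
      intro acc
      simp only [List.foldl_cons, ih, inner]
      constructor
      · rintro ((h | ⟨h1, h2⟩) | ⟨h1, s', hs', h2⟩)
        · exact Or.inl h
        · exact Or.inr ⟨h1, s, List.mem_cons_self, h2⟩
        · exact Or.inr ⟨h1, s', List.mem_cons_of_mem _ hs', h2⟩
      · rintro (h | ⟨h1, s', hs', h2⟩)
        · exact Or.inl (Or.inl h)
        · rcases List.mem_cons.mp hs' with rfl | hs'
          · exact Or.inl (Or.inr ⟨h1, h2⟩)
          · exact Or.inr ⟨h1, s', hs', h2⟩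
  have := outer frontier []
  simpa [bfsStep] using this

theorem bfsLoop_iff (g : List (List Int)) (V : List (List (List Int))) :
    ∀ (k : Nat) (frontier : List (List (List Int))),
      bfsLoop k frontier g V = true ↔
        ∃ l, l ≠ [] ∧ l.length ≤ k ∧ ∃ s ∈ frontier, WalkOK V g s l := by
  intro k
  induction k with
  | zero =>
    intro frontier
    constructor
    · intro h; simp [bfsLoop] at h
    · rintro ⟨l, hne, hlen, -⟩
      cases l with
      | nil => exact absurd rfl hne
      | cons t rest => simp at hlen
  | succ k ih =>
    intro frontier
    by_cases hg : g ∈ bfsStep frontier V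
    · simp only [bfsLoop, if_pos hg, true_iff]
      obtain ⟨hgV, s, hs, hn⟩ := (mem_bfsStep frontier V g).mp hg
      exact ⟨[g], by simp, by simp, s, hs, hn, hgV, rfl⟩
    · by_cases hemp : bfsStep frontier V = []
      · simp only [bfsLoop, if_neg hg, if_pos hemp]
        constructor
        · intro h; exact absurd h (by simp)
        · rintro ⟨l, hne, hlen, s, hs, hw⟩
          exfalso
          cases l with
          | nil => exact hne rfl
          | cons t rest =>
            have : t ∈ bfsStep frontier V := (mem_bfsStep frontier V t).mpr ⟨hw.2.1, s, hs, hw.1⟩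
            rw [hemp] at this
            simp at this
      · simp only [bfsLoop, if_neg hg, if_neg hemp, ih]
        constructor
        · rintro ⟨l, hne, hlen, s, hsnew, hw⟩
          obtain ⟨hsV, s0, hs0, hn0⟩ := (mem_bfsStep frontier V s).mp hsnew
          exact ⟨s :: l, by simp, by simp; omega, s0, hs0, hn0, hsV, hw⟩
        · rintro ⟨l, hne, hlen, s0, hs0, hw⟩
          cases l with
          | nil => exact absurd rfl hne
          | cons t rest =>
            obtain ⟨ht, htV, hw'⟩ := hw
            have htnew : t ∈ bfsStep frontier V := (mem_bfsStep frontier V t).mpr ⟨htV, s0, hs0, ht⟩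
            cases rest with
            | nil => exact absurd (hw' ▸ htnew) hg
            | cons u rest' =>
              refine ⟨u :: rest', by simp, ?_, t, htnew, hw'⟩
              simp at hlen ⊢; omega

-- ===== VERDICT (by name: the statement is the Claim_ definition above) =====
theorem dfs_spec : Claim_equal_dfs := by
  intro board depth max_depth goal_state visited _ _
  unfold Spec_dfs dfs dfs_alt
  by_cases hneg : max_depth - depth < 0
  · have h0 : (max_depth - depth + 1).toNat = 0 := by omega
    rw [h0, if_pos hneg]
    simp [dfsFuel]
  · have hfuel : (max_depth - depth + 1).toNat = (max_depth - depth).toNat + 1 := by omega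
    rw [hfuel, if_neg hneg]
    by_cases hbg : board = goal_state
    · rw [if_pos hbg]
      exact (dfsFuel_succ_iff _ _ _ _).mpr (Or.inl hbg)
    · rw [if_neg hbg, Bool.eq_iff_iff]
      constructor
      · intro h
        obtain ⟨l, hlen, hw⟩ := dfs_to_walk goal_state _ board visited h
        cases l with
        | nil => exact absurd hw hbg
        | cons t rest =>
          refine (bfsLoop_iff goal_state visited _ [board]).mpr
            ⟨t :: rest, by simp, ?_, board, by simp, hw⟩
          omega
      · intro h
        obtain ⟨l, hne, hlen, s, hs, hw⟩ := (bfsLoop_iff goal_state visited _ [board]).mp h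
        have hsb : s = board := by simpa using hs
        subst hsb
        exact walk_to_dfs goal_state l.length l s visited _ (le_refl _) (by omega) hw
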